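/- GENERATED by farm/mkstatement.py from design/units.tsv (unit `run_ctors`) and the Specs of Toyh/Spec/*.lean — do not edit.
   THE STATEMENT of the proof unit `run_ctors`: the function `run_ctors` (9 instructions) satisfies its contract,
   given the contracts of its callees. What the names mean: ProgX/Base/Spec/Basic.lean. The theorem to prove:
   `theorem run_ctors_ok : Toyh.Spec.run_ctors.Statement`. -/
import Toyh.Code
import Toyh.Dec.All
import Toyh.Labels
import Toyh.Spec.Runtime
namespace Toyh.Spec.run_ctors
open X86 X86.User Asan

/-- The statement of unit `run_ctors`. -/
def Statement : Prop :=
  ∀ (Lay : Layout) (_hLay : Lay.hi = 0x1000000) (μ : Microarch) (_hμ : UserX.MicroOK μ) (u₀ : State)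
    (_hcode : HasCodeNat Lay u₀ ProgX.Base.L.run_ctors.entry ProgX.Base.Code.code_run_ctors.nat ProgX.Base.L.run_ctors.size)
    (_h_ctor : Calls Lay μ ProgX.Base.WayInv (ProgX.Base.conv u₀) Toyh.L._sub_I_65535_1.entry (Asan.ctorSpec Toyh.Spec.rt)),
    Calls Lay μ ProgX.Base.WayInv (ProgX.Base.conv u₀) ProgX.Base.L.run_ctors.entry (Asan.runCtorsSpec Toyh.Spec.rt)

end Toyh.Spec.run_ctors
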